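-- pv_equiv track=rewrite | github.com/az275/cs6120-tasks | lesson3/lvn.py | track_overwritten
-- ===== SOURCE A (Python) =====
-- def track_overwritten(instrs):
--     res = [1] * len(instrs)
--     seen = set()
--
--     for i in range(len(instrs) - 1, -1, -1):
--         dest = instrs[i].get('dest')
--         if dest and dest not in seen:
--             res[i] = 0
--             seen.add(dest)
--
--     return res
-- ===== SOURCE B (Python) =====
-- def track_overwritten(instrs):
--     last = {}
--     for i, instr in enumerate(instrs):
--         dest = instr.get('dest')
--         if dest:
--             last[dest] = i
--     res = [1] * len(instrs)
--     for i in last.values():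
--         res[i] = 0
--     return res
-- ===== Notes on version B (the rewrite author's own statement) =====
-- stated objective: alternative
-- what changed: Replaces the single backward pass with a seen-set by a forward pass that records each truthy dest's last index in a dict, then marks those indices in a fresh list of ones.
import Mathlib
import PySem

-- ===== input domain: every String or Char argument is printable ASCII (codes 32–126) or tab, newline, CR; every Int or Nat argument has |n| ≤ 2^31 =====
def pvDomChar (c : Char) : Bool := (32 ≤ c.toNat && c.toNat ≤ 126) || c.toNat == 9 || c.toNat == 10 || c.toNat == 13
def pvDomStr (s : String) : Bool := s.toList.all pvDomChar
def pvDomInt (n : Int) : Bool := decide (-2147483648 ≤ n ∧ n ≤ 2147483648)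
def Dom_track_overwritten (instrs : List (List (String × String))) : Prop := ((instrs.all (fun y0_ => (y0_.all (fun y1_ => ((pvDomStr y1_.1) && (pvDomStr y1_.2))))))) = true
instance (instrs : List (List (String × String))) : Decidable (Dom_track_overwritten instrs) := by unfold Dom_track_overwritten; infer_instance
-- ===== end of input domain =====

-- B replaces A's single backward pass with a seen-set by a two-pass forward scheme:
-- build a dict mapping each truthy dest to its last index, then mark those indices in a list of ones.

-- ===== PORT A =====
-- backward loop over range(len-1, -1, -1); instrs[i] is in range, ported exactly as pyGetD (index always valid)
def track_overwritten (instrs : List (List (String × String))) : List Int :=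
  let res : List Int := List.replicate instrs.length 1
  let st := (PySem.List.pyRange ((instrs.length : Int) - 1) (-1) (-1)).foldl
    (fun (st : List Int × PySem.Set String) i =>
      match PySem.Dict.get? (PySem.Dict.mk (PySem.List.pyGetD instrs i [])) "dest" with
      | some d =>
          if (d != "") && !(PySem.Set.contains st.2 d) then
            (PySem.List.pySetD st.1 i 0, PySem.Set.add st.2 d)
          else st
      | none => st)
    (res, PySem.Set.empty)
  st.1

-- ===== PORT B =====
def track_overwritten_alt (instrs : List (List (String × String))) : List Int :=
  let last := (PySem.List.enumerate instrs 0).foldl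
    (fun (d : PySem.Dict String Int) p =>
      match PySem.Dict.get? (PySem.Dict.mk p.2) "dest" with
      | some dest => if dest != "" then d.insert dest p.1 else d
      | none => d)
    PySem.Dict.empty
  (PySem.Dict.values last).foldl
    (fun res i => PySem.List.pySetD res i 0)
    (List.replicate instrs.length 1)

-- ===== PRECONDITION & SPEC =====
def Spec_track_overwritten (instrs : List (List (String × String))) (out : List Int) : Prop := out = track_overwritten_alt instrs
instance (instrs : List (List (String × String))) (out : List Int) : Decidable (Spec_track_overwritten instrs out) := by unfold Spec_track_overwritten; infer_instance

-- ===== CLAIM (what is proved, stated in full; the proofs are below) =====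
def Claim_equal_track_overwritten : Prop := ∀ (instrs : List (List (String × String))), Dom_track_overwritten instrs → Spec_track_overwritten instrs (track_overwritten instrs)

-- ===== LEMMAS AND PROOFS =====

-- the "truthy dest" of an instruction: some d iff the dict maps "dest" to a nonempty string
def tdest (ins : List (String × String)) : Option String :=
  match PySem.Dict.get? (PySem.Dict.mk ins) "dest" with
  | some d => if d = "" then none else some d
  | none => none

-- is k the last index < m whose truthy dest equals its own (and not excluded by seen)?
def lastIn (instrs : List (List (String × String))) (seen : PySem.Set String) (m k : Nat) : Bool :=
  match tdest (instrs.getD k []) with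
  | some d =>
      decide (k < m) && !(PySem.Set.contains seen d) &&
        decide (∀ j : Nat, j < m → k < j → tdest (instrs.getD j []) ≠ some d)
  | none => false

-- A's loop, re-parameterised by how far down it still has to go
def loopA (instrs : List (List (String × String))) (m : Nat)
    (st : List Int × PySem.Set String) : List Int × PySem.Set String :=
  (PySem.List.pyRange ((m : Int) - 1) (-1) (-1)).foldl
    (fun (st : List Int × PySem.Set String) i =>
      match PySem.Dict.get? (PySem.Dict.mk (PySem.List.pyGetD instrs i [])) "dest" with
      | some d =>
          if (d != "") && !(PySem.Set.contains st.2 d) then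
            (PySem.List.pySetD st.1 i 0, PySem.Set.add st.2 d)
          else st
      | none => st) st

lemma loopA_zero (instrs : List (List (String × String))) (st : List Int × PySem.Set String) :
    loopA instrs 0 st = st := by
  simp [loopA, PySem.List.pyRange_neg_one_eq_nil]

lemma loopA_succ (instrs : List (List (String × String))) (m : Nat)
    (st : List Int × PySem.Set String) :
    loopA instrs (m + 1) st =
      loopA instrs m
        (match PySem.Dict.get? (PySem.Dict.mk (PySem.List.pyGetD instrs (m : Int) [])) "dest" with
         | some d =>
             if (d != "") && !(PySem.Set.contains st.2 d) then
               (PySem.List.pySetD st.1 (m : Int) 0, PySem.Set.add st.2 d)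
             else st
         | none => st) := by
  have h : ((m : Int) + 1 - 1 : Int) = (m : Int) := by ring
  have hcons : PySem.List.pyRange ((m : Int) + 1 - 1) (-1) (-1)
      = (m : Int) :: PySem.List.pyRange ((m : Int) - 1) (-1) (-1) := by
    rw [h]; exact PySem.List.pyRange_neg_one_cons (by omega)
  simp only [loopA, Nat.cast_add, Nat.cast_one, hcons, List.foldl_cons]

lemma track_overwritten_eq_loopA (instrs : List (List (String × String))) :
    track_overwritten instrs =
      (loopA instrs instrs.length (List.replicate instrs.length 1, PySem.Set.empty)).1 := rfl

lemma lastIn_iff (instrs : List (List (String × String))) (seen : PySem.Set String) (m k : Nat) :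
    lastIn instrs seen m k = true ↔
      ∃ d, tdest (instrs.getD k []) = some d ∧ k < m ∧ PySem.Set.contains seen d = false ∧
        ∀ j : Nat, j < m → k < j → tdest (instrs.getD j []) ≠ some d := by
  unfold lastIn
  cases h : tdest (instrs.getD k []) with
  | none => simp
  | some d => simp [and_assoc]

lemma contains_add_iff (s : PySem.Set String) (x y : String) :
    PySem.Set.contains (PySem.Set.add s x) y = true ↔
      (PySem.Set.contains s y = true ∨ y = x) := by
  simp [PySem.Set.contains, PySem.Set.mem_add]

lemma lastIn_zero (instrs : List (List (String × String))) (seen : PySem.Set String) (k : Nat) :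
    lastIn instrs seen 0 k = false := by
  unfold lastIn; cases h : tdest (instrs.getD k []) <;> simp

lemma lastIn_succ_none (instrs : List (List (String × String))) (seen : PySem.Set String)
    (m k : Nat) (htm : tdest (instrs.getD m []) = none) :
    lastIn instrs seen (m + 1) k = lastIn instrs seen m k := by
  rw [Bool.eq_iff_iff, lastIn_iff, lastIn_iff]
  constructor
  · rintro ⟨d, h1, h2, h3, h4⟩
    have hkm : k ≠ m := fun h => by rw [h, htm] at h1; simp at h1
    exact ⟨d, h1, by omega, h3, fun j hj hkj => h4 j (by omega) hkj⟩
  · rintro ⟨d, h1, h2, h3, h4⟩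
    refine ⟨d, h1, by omega, h3, fun j hj hkj => ?_⟩
    rcases Nat.lt_succ_iff_lt_or_eq.mp hj with hj' | hj'
    · exact h4 j hj' hkj
    · subst hj'; rw [htm]; simp

lemma lastIn_succ_seen (instrs : List (List (String × String))) (seen : PySem.Set String)
    (m k : Nat) (d : String) (htm : tdest (instrs.getD m []) = some d)
    (hc : PySem.Set.contains seen d = true) :
    lastIn instrs seen (m + 1) k = lastIn instrs seen m k := by
  rw [Bool.eq_iff_iff, lastIn_iff, lastIn_iff]
  constructor
  · rintro ⟨d', h1, h2, h3, h4⟩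
    have hkm : k ≠ m := fun h => by
      rw [h, htm] at h1
      rw [Option.some.inj h1] at hc
      rw [hc] at h3; exact Bool.noConfusion h3
    exact ⟨d', h1, by omega, h3, fun j hj hkj => h4 j (by omega) hkj⟩
  · rintro ⟨d', h1, h2, h3, h4⟩
    refine ⟨d', h1, by omega, h3, fun j hj hkj => ?_⟩
    rcases Nat.lt_succ_iff_lt_or_eq.mp hj with hj' | hj'
    · exact h4 j hj' hkj
    · subst hj'; rw [htm]; intro hcn
      rw [Option.some.inj hcn] at hc
      rw [hc] at h3; exact Bool.noConfusion h3

lemma lastIn_succ_new (instrs : List (List (String × String))) (seen : PySem.Set String)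
    (m k : Nat) (d : String) (htm : tdest (instrs.getD m []) = some d) (hk : k ≠ m) :
    lastIn instrs (PySem.Set.add seen d) m k = lastIn instrs seen (m + 1) k := by
  rw [Bool.eq_iff_iff, lastIn_iff, lastIn_iff]
  constructor
  · rintro ⟨d', h1, h2, h3, h4⟩
    have hdd : d' ≠ d := fun h => by
      rw [Bool.eq_false_iff] at h3
      exact h3 ((contains_add_iff seen d d').mpr (Or.inr h))
    have hs : PySem.Set.contains seen d' = false := by
      rw [Bool.eq_false_iff]
      intro hcx
      rw [Bool.eq_false_iff] at h3
      exact h3 ((contains_add_iff seen d d').mpr (Or.inl hcx))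
    refine ⟨d', h1, by omega, hs, fun j hj hkj => ?_⟩
    rcases Nat.lt_succ_iff_lt_or_eq.mp hj with hj' | hj'
    · exact h4 j hj' hkj
    · subst hj'; rw [htm]; intro hcn
      exact hdd (Option.some.inj hcn).symm
  · rintro ⟨d', h1, h2, h3, h4⟩
    have hdd : d' ≠ d := by
      intro h
      subst h
      exact h4 m (by omega) (by omega) htm
    have hs : PySem.Set.contains (PySem.Set.add seen d) d' = false := by
      rw [Bool.eq_false_iff]
      intro hcx
      rcases (contains_add_iff seen d d').mp hcx with hc' | hc'
      · rw [hc'] at h3; exact Bool.noConfusion h3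
      · exact hdd hc'
    exact ⟨d', h1, by omega, hs, fun j hj hkj => h4 j (by omega) hkj⟩

lemma lastIn_self (instrs : List (List (String × String))) (seen : PySem.Set String)
    (m : Nat) (d : String) (htm : tdest (instrs.getD m []) = some d)
    (hc : PySem.Set.contains seen d = false) :
    lastIn instrs seen (m + 1) m = true := by
  rw [lastIn_iff]
  exact ⟨d, htm, by omega, hc, fun j hj hkj => by omega⟩

lemma lastIn_false_of_le (instrs : List (List (String × String))) (seen : PySem.Set String)
    (m k : Nat) (h : m ≤ k) : lastIn instrs seen m k = false := by
  rw [Bool.eq_false_iff]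
  intro hcx
  rcases (lastIn_iff instrs seen m k).mp hcx with ⟨d, _, h2, _, _⟩
  omega

-- main invariant for A's loop
lemma loopA_getElem? (instrs : List (List (String × String))) :
    ∀ (m : Nat) (res : List Int) (seen : PySem.Set String), m ≤ res.length → ∀ (k : Nat),
      ((loopA instrs m (res, seen)).1)[k]? =
        if lastIn instrs seen m k then some 0 else res[k]? := by
  intro m
  induction m with
  | zero =>
      intro res seen _ k
      rw [loopA_zero, lastIn_zero]
      simp
  | succ m ih =>
      intro res seen hm k
      rw [loopA_succ]
      have hpg : PySem.List.pyGetD instrs (m : Int) [] = instrs.getD m [] := by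
        simp [PySem.List.pyGetD_natCast]
      rw [hpg]
      rcases hg : PySem.Dict.get? (PySem.Dict.mk (instrs.getD m [])) "dest" with _ | d
      · have htm : tdest (instrs.getD m []) = none := by simp only [tdest]; rw [hg]
        dsimp only
        rw [ih res seen (by omega) k, lastIn_succ_none instrs seen m k htm]
      · by_cases hde : d = ""
        · have htm : tdest (instrs.getD m []) = none := by
            simp only [tdest]; rw [hg]; simp [hde]
          dsimp only
          rw [if_neg (by simp [hde]), ih res seen (by omega) k,
            lastIn_succ_none instrs seen m k htm]
        · have htm : tdest (instrs.getD m []) = some d := by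
            simp only [tdest]; rw [hg]; simp [hde]
          dsimp only
          by_cases hc : PySem.Set.contains seen d = true
          · have hcm : d ∈ seen := by simpa [PySem.Set.contains] using hc
            rw [if_neg (by simp [hcm]), ih res seen (by omega) k,
              lastIn_succ_seen instrs seen m k d htm hc]
          · rw [Bool.not_eq_true] at hc
            have hcm : d ∉ seen := by simpa [PySem.Set.contains] using hc
            rw [if_pos (by simp [hde, hcm]), PySem.List.pySetD_natCast,
              ih (res.set m 0) (PySem.Set.add seen d) (by simp; omega) k]
            by_cases hkm : k = m
            · subst hkm
              rw [lastIn_false_of_le instrs (PySem.Set.add seen d) k k (le_refl k),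
                lastIn_self instrs seen k d htm hc]
              simp [List.getElem?_set]
              omega
            · rw [lastIn_succ_new instrs seen m k d htm hkm]
              have hmk : ¬ (m = k) := fun h => hkm h.symm
              simp [hmk]


-- B's dict-building loop, re-parameterised by the prefix length
def dictB (instrs : List (List (String × String))) (m : Nat) : PySem.Dict String Int :=
  (PySem.List.pyRange 0 (m : Int) 1).foldl
    (fun (d : PySem.Dict String Int) j =>
      match PySem.Dict.get? (PySem.Dict.mk (PySem.List.pyGetD instrs j [])) "dest" with
      | some dest => if dest != "" then d.insert dest j else d
      | none => d)
    PySem.Dict.empty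

lemma dictB_succ (instrs : List (List (String × String))) (m : Nat) :
    dictB instrs (m + 1) =
      (match PySem.Dict.get? (PySem.Dict.mk (PySem.List.pyGetD instrs (m : Int) [])) "dest" with
       | some dest => if dest != "" then (dictB instrs m).insert dest (m : Int) else dictB instrs m
       | none => dictB instrs m) := by
  have h : PySem.List.pyRange 0 ((m : Int) + 1) 1
      = PySem.List.pyRange 0 (m : Int) 1 ++ [(m : Int)] :=
    PySem.List.pyRange_one_succ_right (by omega)
  simp only [dictB, Nat.cast_add, Nat.cast_one, h, List.foldl_append, List.foldl_cons, List.foldl_nil]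

lemma alt_eq_dictB (instrs : List (List (String × String))) :
    track_overwritten_alt instrs =
      (PySem.Dict.values (dictB instrs instrs.length)).foldl
        (fun res i => PySem.List.pySetD res i 0)
        (List.replicate instrs.length 1) := by
  simp only [track_overwritten_alt, dictB,
    PySem.List.enumerate_eq_map_pyRange (d := ([] : List (String × String))), List.foldl_map,
    PySem.List.len]

lemma dictB_nodup (instrs : List (List (String × String))) (m : Nat) :
    (dictB instrs m).keys.Nodup := by
  induction m with
  | zero =>
      simp [dictB]
  | succ m ih =>
      rw [dictB_succ]
      match PySem.Dict.get? (PySem.Dict.mk (PySem.List.pyGetD instrs (m : Int) [])) "dest" with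
      | some dest =>
          by_cases h : dest = "" <;> simp [h, PySem.Dict.nodup_keys_insert, ih]
      | none => exact ih

lemma dictB_get? (instrs : List (List (String × String))) :
    ∀ (m : Nat) (d : String) (i : Int),
      ((dictB instrs m).get? d = some i ↔
        ∃ k : Nat, i = (k : Int) ∧ k < m ∧ tdest (instrs.getD k []) = some d ∧
          ∀ j : Nat, j < m → k < j → tdest (instrs.getD j []) ≠ some d) := by
  intro m
  induction m with
  | zero =>
      intro d i
      simp [dictB, PySem.Dict.get?_empty]
  | succ m ih =>
      intro d i
      rw [dictB_succ]
      have hpg : PySem.List.pyGetD instrs (m : Int) [] = instrs.getD m [] := by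
        simp [PySem.List.pyGetD_natCast]
      rw [hpg]
      rcases hg : PySem.Dict.get? (PySem.Dict.mk (instrs.getD m [])) "dest" with _ | dest
      · -- no "dest" key at index m
        have htm : tdest (instrs.getD m []) = none := by simp only [tdest]; rw [hg]
        dsimp only
        rw [ih]
        constructor
        · rintro ⟨k, hk1, hk2, hk3, hk4⟩
          exact ⟨k, hk1, by omega, hk3, fun j hj hkj => by
            rcases Nat.lt_succ_iff_lt_or_eq.mp hj with hj' | hj'
            · exact hk4 j hj' hkj
            · subst hj'; rw [htm]; simp⟩
        · rintro ⟨k, hk1, hk2, hk3, hk4⟩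
          have hkm : k ≠ m := fun h => by rw [h, htm] at hk3; simp at hk3
          exact ⟨k, hk1, by omega, hk3, fun j hj hkj => hk4 j (by omega) hkj⟩
      · by_cases hde : dest = ""
        · -- falsy dest at index m: loop skips, tdest is none
          have htm : tdest (instrs.getD m []) = none := by
            simp only [tdest]; rw [hg]; simp [hde]
          dsimp only
          rw [if_neg (by simp [hde]), ih]
          constructor
          · rintro ⟨k, hk1, hk2, hk3, hk4⟩
            exact ⟨k, hk1, by omega, hk3, fun j hj hkj => by
              rcases Nat.lt_succ_iff_lt_or_eq.mp hj with hj' | hj'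
              · exact hk4 j hj' hkj
              · subst hj'; rw [htm]; simp⟩
          · rintro ⟨k, hk1, hk2, hk3, hk4⟩
            have hkm : k ≠ m := fun h => by rw [h, htm] at hk3; simp at hk3
            exact ⟨k, hk1, by omega, hk3, fun j hj hkj => hk4 j (by omega) hkj⟩
        · -- truthy dest at index m: overwrite
          have htm : tdest (instrs.getD m []) = some dest := by
            simp only [tdest]; rw [hg]; simp [hde]
          dsimp only
          rw [if_pos (by simp [hde])]
          by_cases hdd : d = dest
          · subst hdd
            rw [PySem.Dict.get?_insert_self]
            constructor
            · rintro h
              have hi : i = (m : Int) := (Option.some.inj h).symm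
              exact ⟨m, hi, by omega, htm, fun j hj hkj => by omega⟩
            · rintro ⟨k, hk1, hk2, hk3, hk4⟩
              have hkm : k = m := by
                by_contra hne
                exact hk4 m (by omega) (by omega) htm
              subst hkm; rw [hk1]
          · rw [PySem.Dict.get?_insert, if_neg hdd, ih]
            constructor
            · rintro ⟨k, hk1, hk2, hk3, hk4⟩
              exact ⟨k, hk1, by omega, hk3, fun j hj hkj => by
                rcases Nat.lt_succ_iff_lt_or_eq.mp hj with hj' | hj'
                · exact hk4 j hj' hkj
                · subst hj'; rw [htm]; intro hc
                  exact hdd (Option.some.inj hc).symm⟩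
            · rintro ⟨k, hk1, hk2, hk3, hk4⟩
              have hkm : k ≠ m := fun h => by
                rw [h, htm] at hk3
                exact hdd (Option.some.inj hk3).symm
              exact ⟨k, hk1, by omega, hk3, fun j hj hkj => hk4 j (by omega) hkj⟩

-- the marking loop over a list of nonnegative indices
lemma mark_getElem? : ∀ (l : List Int) (res : List Int), (∀ i ∈ l, 0 ≤ i) → ∀ (k : Nat),
    (l.foldl (fun r i => PySem.List.pySetD r i 0) res)[k]? =
      if (k : Int) ∈ l ∧ k < res.length then some 0 else res[k]? := by
  intro l
  induction l with
  | nil => intro res _ k; simp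
  | cons x l ih =>
      intro res hpos k
      have hx : 0 ≤ x := hpos x (by simp)
      rw [List.foldl_cons, PySem.List.pySetD_of_nonneg res 0 hx,
        ih _ (fun i hi => hpos i (by simp [hi]))]
      simp only [List.length_set, List.mem_cons, List.getElem?_set]
      split_ifs with h1 h2 h3 h4 h5 h6 h7 <;>
        first
        | rfl
        | (exfalso; omega)
        | tauto
        | (rw [List.getElem?_eq_none]; omega)
        | (exact absurd (h7.1.resolve_left (by omega)) (fun hc => h1 ⟨hc, h7.2⟩))

lemma mem_values_dictB (instrs : List (List (String × String))) (m : Nat) (i : Int) :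
    i ∈ PySem.Dict.values (dictB instrs m) ↔ ∃ d, (dictB instrs m).get? d = some i := by
  constructor
  · intro h
    simp only [PySem.Dict.values, List.mem_map] at h
    rcases h with ⟨p, hp, hpi⟩
    exact ⟨p.1, by
      rw [← hpi]
      exact PySem.Dict.get?_of_mem_items _ (by rwa [Prod.mk.eta]) (dictB_nodup instrs m)⟩
  · rintro ⟨d, hd⟩
    have hmem := PySem.Dict.mem_items_of_get?_eq_some _ hd
    simp only [PySem.Dict.values, List.mem_map]
    exact ⟨(d, i), hmem, rfl⟩

-- ===== VERDICT (by name: the statement is the Claim_ definition above) =====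
theorem track_overwritten_spec : Claim_equal_track_overwritten := by
  intro instrs _
  show track_overwritten instrs = track_overwritten_alt instrs
  have hpos : ∀ i ∈ PySem.Dict.values (dictB instrs instrs.length), 0 ≤ i := by
    intro i hi
    rcases (mem_values_dictB instrs instrs.length i).mp hi with ⟨d, hd⟩
    rcases (dictB_get? instrs instrs.length d i).mp hd with ⟨k, hk1, _⟩
    rw [hk1]
    exact Int.natCast_nonneg k
  apply List.ext_getElem?
  intro k
  rw [track_overwritten_eq_loopA,
    loopA_getElem? instrs instrs.length (List.replicate instrs.length 1) PySem.Set.empty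
      (by simp) k,
    alt_eq_dictB,
    mark_getElem? _ _ hpos k]
  have hiff : lastIn instrs PySem.Set.empty instrs.length k = true ↔
      ((k : Int) ∈ PySem.Dict.values (dictB instrs instrs.length) ∧
        k < (List.replicate instrs.length (1 : Int)).length) := by
    rw [lastIn_iff]
    constructor
    · rintro ⟨d, h1, h2, h3, h4⟩
      exact ⟨(mem_values_dictB _ _ _).mpr
        ⟨d, (dictB_get? instrs instrs.length d k).mpr ⟨k, rfl, h2, h1, h4⟩⟩, by simpa using h2⟩
    · rintro ⟨hv, hk⟩
      rcases (mem_values_dictB _ _ _).mp hv with ⟨d, hd⟩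
      rcases (dictB_get? instrs instrs.length d _).mp hd with ⟨k', hk1, hk2, hk3, hk4⟩
      have hke : k' = k := by omega
      subst hke
      exact ⟨d, hk3, hk2, by simp [PySem.Set.contains, PySem.Set.empty], hk4⟩
  by_cases h : lastIn instrs PySem.Set.empty instrs.length k = true
  · rw [if_pos h, if_pos (hiff.mp h)]
  · rw [if_neg h, if_neg (fun hc => h (hiff.mpr hc))]
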